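-- pv_equiv track=rewrite | github.com/Sunny-Heo-myth/algorithm-practice | src/main/java/oldfiles/python/Test.py | solution
-- ===== SOURCE A (Python) =====
-- def solution(answers):
--
--     person_1 = [1, 2, 3, 4, 5]
--     person_2 = [2, 1, 2, 3, 2, 4, 2, 5]
--     person_3 = [3, 3, 1, 1, 2, 2, 4, 4, 5, 5]
--     count_1 = 0; count_2 = 0; count_3 = 0
--     answer = []
--
--     for i in range(len(answers)) :
--         if answers[i] == person_1[i%len(person_1)] : count_1 += 1
--         if answers[i] == person_2[i%len(person_2)] : count_2 += 1
--         if answers[i] == person_3[i%len(person_3)] : count_3 += 1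
--
--     answer_t = [count_1, count_2, count_3]
--
--     for person, score in enumerate(answer_t):
--         if score == max(answer_t):
--             answer.append(person + 1)
--
--     return answer
-- ===== SOURCE B (Python) =====
-- def solution(answers):
--     counts = []
--     for pattern in ([1, 2, 3, 4, 5],
--                     [2, 1, 2, 3, 2, 4, 2, 5],
--                     [3, 3, 1, 1, 2, 2, 4, 4, 5, 5]):
--         queue = list(pattern)
--         score = 0
--         for a in answers:
--             guess = queue.pop(0)
--             if a == guess:
--                 score += 1
--             queue.append(guess)
--         counts.append(score)
--     best = max(counts)
--     return [i + 1 for i, c in enumerate(counts) if c == best]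
-- ===== Notes on version B (the rewrite author's own statement) =====
-- stated objective: alternative
-- what changed: Replaces the single indexed pass with i%len(pattern) lookups and three parallel counters by a per-pattern loop that maintains a rotating queue (pop front, compare, push back) so no index or modulo arithmetic is used, then picks winners by a comprehension over the count list instead of an append loop.
import Mathlib
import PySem

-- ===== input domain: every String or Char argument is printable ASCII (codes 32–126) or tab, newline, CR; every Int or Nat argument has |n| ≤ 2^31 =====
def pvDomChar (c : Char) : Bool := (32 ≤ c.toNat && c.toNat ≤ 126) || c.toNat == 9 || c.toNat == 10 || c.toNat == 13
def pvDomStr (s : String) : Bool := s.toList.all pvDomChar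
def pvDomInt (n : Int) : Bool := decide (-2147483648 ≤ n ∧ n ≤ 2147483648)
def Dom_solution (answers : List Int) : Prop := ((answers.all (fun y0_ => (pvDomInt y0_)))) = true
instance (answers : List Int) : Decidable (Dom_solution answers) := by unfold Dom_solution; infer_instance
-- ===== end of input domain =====

-- B replaces A's indexed pass with i%len lookups by per-pattern rotating-queue loops
-- (pop front, compare, push back); same complexity, no speed claim.

-- ===== PORT A =====
-- p[i % len(p)] (Python % with a positive divisor); the index is always in range here
def patAt (p : List Int) (i : Int) : Int :=
  (PySem.List.pyGet? p (PySem.Int.mod i (p.length : Int))).getD 0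

-- the loop 'for i in range(len(answers))' carrying the three counters; answers[i] is
-- always in range, so the pyGet? default is never used
def solutionLoopA (answers : List Int) : List Int → Int → Int → Int → Int × Int × Int
  | [], c1, c2, c3 => (c1, c2, c3)
  | i :: rest, c1, c2, c3 =>
      let a := (PySem.List.pyGet? answers i).getD 0
      solutionLoopA answers rest
        (if a = patAt [1, 2, 3, 4, 5] i then c1 + 1 else c1)
        (if a = patAt [2, 1, 2, 3, 2, 4, 2, 5] i then c2 + 1 else c2)
        (if a = patAt [3, 3, 1, 1, 2, 2, 4, 4, 5, 5] i then c3 + 1 else c3)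

def solution (answers : List Int) : List Int :=
  let cs := solutionLoopA answers (PySem.List.pyRange 0 (answers.length : Int) 1) 0 0 0
  let answer_t : List Int := [cs.1, cs.2.1, cs.2.2]
  let m := (PySem.List.max? answer_t (fun x => x)).getD 0
  (PySem.List.enumerate answer_t).foldl
    (fun acc ps => if ps.2 = m then acc ++ [ps.1 + 1] else acc) []

-- ===== PORT B =====
-- the inner loop: queue.pop(0); compare; queue.append(guess).  The queue is one of the
-- three nonempty pattern literals rotated, so pop(0) never fails; headD's default is
-- never used.
def rotScore : List Int → List Int → Int → Int
  | [], _, score => score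
  | a :: rest, queue, score =>
      let guess := queue.headD 0
      rotScore rest (queue.tail ++ [guess]) (if a = guess then score + 1 else score)

def solution_alt (answers : List Int) : List Int :=
  let counts := ([[1, 2, 3, 4, 5], [2, 1, 2, 3, 2, 4, 2, 5],
                  [3, 3, 1, 1, 2, 2, 4, 4, 5, 5]] : List (List Int)).foldl
    (fun acc pattern => acc ++ [rotScore answers pattern 0]) []
  let best := (PySem.List.max? counts (fun x => x)).getD 0
  ((PySem.List.enumerate counts).filter (fun ic => ic.2 = best)).map (fun ic => ic.1 + 1)

-- ===== PRECONDITION & SPEC =====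
def Spec_solution (answers : List Int) (out : List Int) : Prop := out = solution_alt answers
instance (answers : List Int) (out : List Int) : Decidable (Spec_solution answers out) := by
  unfold Spec_solution; infer_instance

-- ===== CLAIM =====
def Claim_equal_solution : Prop :=
  ∀ (answers : List Int), Dom_solution answers → Spec_solution answers (solution answers)

-- ===== LEMMAS AND PROOFS =====

-- one rotation step of the queue
def rotQ (q : List Int) : List Int := q.tail ++ [q.headD 0]

-- n rotation steps
def rotIter (p : List Int) : Nat → List Int
  | 0 => p
  | n + 1 => rotQ (rotIter p n)

theorem rotIter_eq (p : List Int) (hp : p ≠ []) (n : Nat) :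
    rotIter p n = p.drop (n % p.length) ++ p.take (n % p.length) := by
  induction n with
  | zero => simp [rotIter]
  | succ n ih =>
    have hL : 0 < p.length := List.length_pos_iff.mpr hp
    have hr : n % p.length < p.length := Nat.mod_lt _ hL
    have hdrop_ne : p.drop (n % p.length) ≠ [] := by
      simp [List.drop_eq_nil_iff]; omega
    rw [rotIter, ih, rotQ]
    obtain ⟨x, xs, hx⟩ := List.exists_cons_of_ne_nil hdrop_ne
    have hxval : x = p[n % p.length]'hr := by
      have h1 : p[n % p.length]? = some x := by
        rw [← Nat.add_zero (n % p.length), ← List.getElem?_drop, hx]; rfl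
      rw [List.getElem?_eq_getElem hr] at h1
      exact (Option.some_inj.mp h1).symm
    have hxs : xs = p.drop (n % p.length + 1) := by
      have h2 : (p.drop (n % p.length)).tail = p.drop (n % p.length + 1) :=
        List.tail_drop ..
      rw [hx] at h2; simpa using h2
    have htake : p.take (n % p.length) ++ [x] = p.take (n % p.length + 1) := by
      rw [List.take_add_one, hxval]
      simp [List.getElem?_eq_getElem hr]
    have hmod : (n + 1) % p.length = (n % p.length + 1) % p.length :=
      (Nat.mod_add_mod n p.length 1).symm
    rw [hx]
    simp only [List.cons_append, List.tail_cons, List.headD_cons, List.append_assoc, htake, hxs]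
    rcases Nat.lt_or_ge (n % p.length + 1) p.length with h | h
    · rw [hmod, Nat.mod_eq_of_lt h]
    · have heq : n % p.length + 1 = p.length := by omega
      rw [hmod, heq]
      simp

theorem patAt_natCast (p : List Int) (hp : p ≠ []) (n : Nat) :
    patAt p (n : Int) = (rotIter p n).headD 0 := by
  have hL : 0 < p.length := List.length_pos_iff.mpr hp
  have hr : n % p.length < p.length := Nat.mod_lt _ hL
  have hdrop_ne : p.drop (n % p.length) ≠ [] := by
    simp [List.drop_eq_nil_iff]; omega
  obtain ⟨x, xs, hx⟩ := List.exists_cons_of_ne_nil hdrop_ne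
  have hxval : x = p[n % p.length]'hr := by
    have h1 : p[n % p.length]? = some x := by
      rw [← Nat.add_zero (n % p.length), ← List.getElem?_drop, hx]; rfl
    rw [List.getElem?_eq_getElem hr] at h1
    exact (Option.some_inj.mp h1).symm
  rw [rotIter_eq p hp n, hx]
  simp only [List.cons_append, List.headD_cons, hxval]
  rw [patAt, PySem.Int.mod_natCast, PySem.List.pyGet?_natCast]
  simp [List.getElem?_eq_getElem hr]

-- A's per-pattern running count over enumerate equals B's rotating-queue loop
theorem enumFold_eq_rotScore (p : List Int) (hp : p ≠ []) (l : List Int) :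
    ∀ (n : Nat) (s : Int),
      (PySem.List.enumerate l (n : Int)).foldl
          (fun s ia => s + (if ia.2 = patAt p ia.1 then 1 else 0)) s
        = rotScore l (rotIter p n) s := by
  induction l with
  | nil => intro n s; simp [PySem.List.enumerate_nil, rotScore]
  | cons a t ih =>
    intro n s
    rw [PySem.List.enumerate_cons, List.foldl_cons]
    have hcast : (n : Int) + 1 = ((n + 1 : Nat) : Int) := by push_cast; ring
    rw [hcast, ih (n + 1)]
    show _ = rotScore (a :: t) (rotIter p n) s
    rw [rotScore]
    have hrot : (rotIter p n).tail ++ [(rotIter p n).headD 0] = rotIter p (n + 1) := by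
      rw [rotIter]; rfl
    rw [hrot, patAt_natCast p hp n]
    congr 1
    split_ifs <;> ring

-- A's triple-counter pass computes, componentwise, three per-pattern fold counts
theorem loopA_eq (answers : List Int) (l : List Int) (c1 c2 c3 : Int) :
    solutionLoopA answers l c1 c2 c3 =
      (c1 + l.foldl (fun s i => s + (if (PySem.List.pyGet? answers i).getD 0
          = patAt [1, 2, 3, 4, 5] i then 1 else 0)) 0,
       c2 + l.foldl (fun s i => s + (if (PySem.List.pyGet? answers i).getD 0
          = patAt [2, 1, 2, 3, 2, 4, 2, 5] i then 1 else 0)) 0,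
       c3 + l.foldl (fun s i => s + (if (PySem.List.pyGet? answers i).getD 0
          = patAt [3, 3, 1, 1, 2, 2, 4, 4, 5, 5] i then 1 else 0)) 0) := by
  induction l generalizing c1 c2 c3 with
  | nil => simp [solutionLoopA]
  | cons hd tl ih =>
    simp only [solutionLoopA, ih, List.foldl_cons, PySem.List.foldl_add]
    split_ifs <;> simp only [Prod.mk.injEq] <;> exact ⟨by ring, by ring, by ring⟩

-- the fold over range(len answers) with answers[i] is the fold over enumerate(answers),
-- and hence the rotating-queue score
theorem range_fold_eq_rotScore (answers : List Int) (p : List Int) (hp : p ≠ []) :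
    (PySem.List.pyRange 0 (answers.length : Int) 1).foldl
        (fun s i => s + (if (PySem.List.pyGet? answers i).getD 0 = patAt p i then 1 else 0)) 0
      = rotScore answers p 0 := by
  have h := PySem.List.enumerate_eq_map_pyRange answers (0 : Int)
  have h2 : (PySem.List.enumerate answers).foldl
      (fun s ia => s + (if ia.2 = patAt p ia.1 then 1 else 0)) 0 = rotScore answers p 0 := by
    have h3 := enumFold_eq_rotScore p hp answers 0 0
    simpa [rotIter] using h3
  rw [h, List.foldl_map] at h2
  simpa [PySem.List.len, PySem.List.pyGetD] using h2

theorem counts_eq (answers : List Int) :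
    solutionLoopA answers (PySem.List.pyRange 0 (answers.length : Int) 1) 0 0 0 =
      (rotScore answers [1, 2, 3, 4, 5] 0,
       rotScore answers [2, 1, 2, 3, 2, 4, 2, 5] 0,
       rotScore answers [3, 3, 1, 1, 2, 2, 4, 4, 5, 5] 0) := by
  rw [loopA_eq,
    range_fold_eq_rotScore answers [1, 2, 3, 4, 5] (by simp),
    range_fold_eq_rotScore answers [2, 1, 2, 3, 2, 4, 2, 5] (by simp),
    range_fold_eq_rotScore answers [3, 3, 1, 1, 2, 2, 4, 4, 5, 5] (by simp)]
  simp

-- A's append loop over (index, score) pairs is B's filter-then-map comprehension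
theorem select_eq (l : List (Int × Int)) (m : Int) (acc : List Int) :
    l.foldl (fun acc ps => if ps.2 = m then acc ++ [ps.1 + 1] else acc) acc =
      acc ++ (l.filter (fun ic => ic.2 = m)).map (fun ic => ic.1 + 1) := by
  induction l generalizing acc with
  | nil => simp
  | cons hd tl ih =>
    simp only [List.foldl_cons, List.filter_cons]
    by_cases h : hd.2 = m <;> simp [h, ih]

-- ===== VERDICT =====
theorem solution_spec : Claim_equal_solution := by
  intro answers _
  unfold Spec_solution solution solution_alt
  simp only [counts_eq, List.foldl_cons, List.foldl_nil, List.nil_append, List.cons_append,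
    select_eq]
  rfl
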